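-- pv_equiv track=rewrite | github.com/Rayxan/UNB | 1° semestre/APC verão/Raylan da Silva Sales_lab_3/Python/Lab3a.py | fneuronio
-- ===== SOURCE A (Python) =====
-- def fneuronio(ENTRADAS, PESOS, T):
--     SOMAP = 0
--     for i in range(0, 10):
--         SOMAP += (ENTRADAS+1) * (PESOS+1)
--     if SOMAP > T:
--         return 1
--     else:
--         return 0
-- ===== SOURCE B (Python) =====
-- def fneuronio(ENTRADAS, PESOS, T):
--     # distribute the product and scale once: 10*E*P + 10*E + 10*P + 10
--     return int(T < 10 * ENTRADAS * PESOS + 10 * ENTRADAS + 10 * PESOS + 10)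
-- ===== Notes on version B (the rewrite author's own statement) =====
-- stated objective: simpler
-- what changed: Drops the 10-iteration accumulation loop and computes the threshold test directly on the distributed closed form 10*E*P + 10*E + 10*P + 10, returning int(bool) instead of an if/else on an accumulator.
import Mathlib
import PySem

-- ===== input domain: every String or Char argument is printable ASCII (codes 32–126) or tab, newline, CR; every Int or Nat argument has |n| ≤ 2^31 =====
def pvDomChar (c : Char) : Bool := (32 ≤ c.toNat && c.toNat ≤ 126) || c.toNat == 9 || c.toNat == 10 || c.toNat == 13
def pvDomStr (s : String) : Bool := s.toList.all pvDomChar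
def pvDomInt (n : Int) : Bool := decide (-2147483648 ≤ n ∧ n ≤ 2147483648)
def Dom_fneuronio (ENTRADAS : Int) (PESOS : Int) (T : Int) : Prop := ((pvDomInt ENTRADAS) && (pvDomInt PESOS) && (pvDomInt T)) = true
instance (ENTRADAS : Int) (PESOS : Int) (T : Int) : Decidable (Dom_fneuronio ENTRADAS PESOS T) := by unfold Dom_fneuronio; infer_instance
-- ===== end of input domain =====

-- B replaces the fixed accumulation loop by one direct threshold test on the
-- distributed closed form; objective: simpler.

-- ===== PORT A =====
-- Loop over range(0,10) accumulating SOMAP += (ENTRADAS+1)*(PESOS+1), then if/else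
def fneuronio (ENTRADAS : Int) (PESOS : Int) (T : Int) : Int :=
  let SOMAP := (PySem.List.pyRange 0 10 1).foldl (fun acc _ => acc + (ENTRADAS + 1) * (PESOS + 1)) 0
  if SOMAP > T then 1 else 0

-- ===== PORT B =====
-- int(T < 10*E*P + 10*E + 10*P + 10): bool-to-int of the distributed form
def fneuronio_alt (ENTRADAS : Int) (PESOS : Int) (T : Int) : Int :=
  if T < 10 * ENTRADAS * PESOS + 10 * ENTRADAS + 10 * PESOS + 10 then 1 else 0

-- ===== PRECONDITION & SPEC =====
def Spec_fneuronio (ENTRADAS : Int) (PESOS : Int) (T : Int) (out : Int) : Prop := out = fneuronio_alt ENTRADAS PESOS T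
instance (ENTRADAS : Int) (PESOS : Int) (T : Int) (out : Int) : Decidable (Spec_fneuronio ENTRADAS PESOS T out) := by unfold Spec_fneuronio; infer_instance

-- ===== CLAIM =====
def Claim_equal_fneuronio : Prop := ∀ (ENTRADAS : Int) (PESOS : Int) (T : Int), Dom_fneuronio ENTRADAS PESOS T → Spec_fneuronio ENTRADAS PESOS T (fneuronio ENTRADAS PESOS T)

-- ===== LEMMAS AND PROOFS =====

-- ===== VERDICT =====
theorem fneuronio_spec : Claim_equal_fneuronio := by
  intro E P T _
  unfold Spec_fneuronio fneuronio fneuronio_alt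
  have h : (PySem.List.pyRange 0 10 1).foldl (fun acc _ => acc + (E + 1) * (P + 1)) 0
      = 10 * E * P + 10 * E + 10 * P + 10 := by
    simp [PySem.List.pyRange, List.range_succ]
    ring
  rw [h]
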